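-- pv_equiv track=rewrite | github.com/basma812/farkle | farkle/check_fourpluspair.py | check_fourpluspair
-- ===== SOURCE A (Python) =====
-- def check_fourpluspair(dice_list):
--     for i in dice_list:
--         # times is how many times the element occurs in the list
--         times = dice_list.count(i)
--         if times == 4:
--             k = i
--             for j in dice_list:
--                 if k != j:
--                     times = dice_list.count(j)
--                     if times == 2:
--                         return 1500
--     return 0
-- ===== SOURCE B (Python) =====
-- def check_fourpluspair(dice_list):
--     counts = {}
--     for d in dice_list:
--         counts[d] = counts.get(d, 0) + 1
--     vals = counts.values()
--     return 1500 if 4 in vals and 2 in vals else 0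
-- ===== Notes on version B (the rewrite author's own statement) =====
-- stated objective: faster
-- what changed: A's nested loops with repeated O(n) .count scans are replaced by building a frequency table in one pass and testing whether 4 and 2 appear among its values (the pair value is automatically distinct from the quad value since no value can have both counts).
import Mathlib
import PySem

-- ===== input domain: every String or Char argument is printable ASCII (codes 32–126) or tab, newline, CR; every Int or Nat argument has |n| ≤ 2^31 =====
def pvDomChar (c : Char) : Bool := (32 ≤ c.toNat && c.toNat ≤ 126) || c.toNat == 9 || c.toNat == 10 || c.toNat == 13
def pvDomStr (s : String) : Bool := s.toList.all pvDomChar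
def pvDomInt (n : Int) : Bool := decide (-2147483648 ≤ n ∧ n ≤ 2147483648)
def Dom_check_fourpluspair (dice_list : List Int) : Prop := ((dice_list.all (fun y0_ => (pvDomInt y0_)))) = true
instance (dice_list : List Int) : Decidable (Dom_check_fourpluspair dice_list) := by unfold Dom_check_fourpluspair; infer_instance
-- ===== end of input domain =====

-- B replaces A's nested .count scans by one frequency table built in a single pass plus two membership tests.

-- ===== PORT A =====
-- inner 'for j in dice_list' loop (k = the quad value): returns some 1500 on the first j ≠ k
-- with dice_list.count(j) == 2, else falls through (none)
def pvInnerA (l : List Int) (k : Int) : List Int → Option Int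
  | [] => none
  | j :: rest =>
    if k ≠ j then
      if PySem.List.count l j = 2 then some 1500 else pvInnerA l k rest
    else pvInnerA l k rest

-- outer 'for i in dice_list' loop: on count 4 run the inner loop; a return there ends the function
def pvOuterA (l : List Int) : List Int → Int
  | [] => 0
  | i :: rest =>
    if PySem.List.count l i = 4 then
      match pvInnerA l i l with
      | some v => v
      | none => pvOuterA l rest
    else pvOuterA l rest

def check_fourpluspair (dice_list : List Int) : Int :=
  pvOuterA dice_list dice_list

-- ===== PORT B =====
def check_fourpluspair_alt (dice_list : List Int) : Int :=
  let counts := dice_list.foldl (fun d x => d.insert x (d.getD x 0 + 1)) PySem.Dict.empty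
  let vals := counts.values
  if (4 : Int) ∈ vals ∧ (2 : Int) ∈ vals then 1500 else 0

-- ===== PRECONDITION & SPEC =====
def Spec_check_fourpluspair (dice_list : List Int) (out : Int) : Prop := out = check_fourpluspair_alt dice_list
instance (dice_list : List Int) (out : Int) : Decidable (Spec_check_fourpluspair dice_list out) := by unfold Spec_check_fourpluspair; infer_instance

-- ===== CLAIM =====
def Claim_equal_check_fourpluspair : Prop := ∀ (dice_list : List Int), Dom_check_fourpluspair dice_list → Spec_check_fourpluspair dice_list (check_fourpluspair dice_list)

-- ===== LEMMAS AND PROOFS =====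

lemma pvInnerA_eq (l : List Int) (k : Int) (m : List Int) :
    pvInnerA l k m = if ∃ j ∈ m, k ≠ j ∧ List.count j l = 2 then some 1500 else none := by
  induction m with
  | nil => simp [pvInnerA]
  | cons j rest ih =>
    by_cases h1 : k = j
    · subst h1
      simp [pvInnerA, ih]
    · by_cases h2 : List.count j l = 2
      · simp [pvInnerA, PySem.List.count, h1, h2]
      · simp [pvInnerA, PySem.List.count, ih, h1, h2]

lemma pvOuterA_eq (l : List Int) (m : List Int) :
    pvOuterA l m =
      if (∃ i ∈ m, List.count i l = 4) ∧ (∃ j ∈ l, List.count j l = 2)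
      then 1500 else 0 := by
  induction m with
  | nil => simp [pvOuterA]
  | cons i rest ih =>
    by_cases h4 : List.count i l = 4
    · simp only [pvOuterA, PySem.List.count, h4, if_pos, pvInnerA_eq]
      by_cases hp : ∃ j ∈ l, List.count j l = 2
      · have hp' : ∃ j ∈ l, i ≠ j ∧ List.count j l = 2 := by
          obtain ⟨j, hj, hc⟩ := hp
          exact ⟨j, hj, by intro e; rw [← e] at hc; omega, hc⟩
        rw [if_pos hp']
        exact (if_pos ⟨⟨i, by simp, h4⟩, hp⟩).symm
      · have hp' : ¬ ∃ j ∈ l, i ≠ j ∧ List.count j l = 2 := by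
          intro ⟨j, hj, _, hc⟩; exact hp ⟨j, hj, hc⟩
        rw [if_neg hp']
        simp [ih, hp]
    · simp [pvOuterA, PySem.List.count, ih, h4]

lemma alt_eq (l : List Int) :
    check_fourpluspair_alt l =
      if (∃ i ∈ l, List.count i l = 4) ∧ (∃ j ∈ l, List.count j l = 2)
      then 1500 else 0 := by
  simp only [check_fourpluspair_alt]
  rw [PySem.Dict.foldl_insert_getD_add_one_eq_counter]
  have hv : (PySem.Dict.counter l).values
      = (PySem.Set.ofList l).map (fun k => (List.count k l : Int)) := by
    simp only [PySem.Dict.values, PySem.Dict.items_counter, List.map_map]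
    rfl
  rw [hv]
  congr 1
  simp only [eq_iff_iff, List.mem_map, PySem.Set.mem_ofList]
  constructor
  · rintro ⟨⟨x, hx, h4⟩, ⟨y, hy, h2⟩⟩
    exact ⟨⟨x, hx, by exact_mod_cast h4⟩, ⟨y, hy, by exact_mod_cast h2⟩⟩
  · rintro ⟨⟨x, hx, h4⟩, ⟨y, hy, h2⟩⟩
    exact ⟨⟨x, hx, by exact_mod_cast h4⟩, ⟨y, hy, by exact_mod_cast h2⟩⟩

-- ===== VERDICT =====
theorem check_fourpluspair_spec : Claim_equal_check_fourpluspair := by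
  intro l _
  unfold Spec_check_fourpluspair check_fourpluspair
  rw [pvOuterA_eq, alt_eq]
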